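-- pv_equiv track=rewrite | github.com/llores28/PersonalAsst_v1 | src/bot/handler_utils.py | _extract_embedded_command
-- ===== SOURCE A (Python) =====
-- def _extract_embedded_command(text: str) -> str | None:
--     stripped = text.strip()
--     lowered = stripped.lower()
--     prefixes = ("run ", "use ", "do ", "execute ")
--
--     if stripped.startswith("/"):
--         return stripped
--
--     for prefix in prefixes:
--         if lowered.startswith(prefix):
--             candidate = stripped[len(prefix):].strip()
--             if candidate.startswith("/"):
--                 return candidate
--
--     return None
-- ===== SOURCE B (Python) =====
-- def _extract_embedded_command(text: str) -> str | None:
--     stripped = text.strip()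
--     if stripped.startswith("/"):
--         return stripped
--     i = stripped.find(" ")
--     if i != -1 and stripped[:i].lower() in {"run", "use", "do", "execute"}:
--         candidate = stripped[i + 1:].strip()
--         if candidate.startswith("/"):
--             return candidate
--     return None
-- ===== Notes on version B (the rewrite author's own statement) =====
-- stated objective: simpler
-- what changed: B locates the single first-space split point with str.find and checks the lowercased leading token against a set, instead of A's loop over four 'verb ' prefixes with startswith on the whole lowercased string and per-prefix slicing.
import Mathlib
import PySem

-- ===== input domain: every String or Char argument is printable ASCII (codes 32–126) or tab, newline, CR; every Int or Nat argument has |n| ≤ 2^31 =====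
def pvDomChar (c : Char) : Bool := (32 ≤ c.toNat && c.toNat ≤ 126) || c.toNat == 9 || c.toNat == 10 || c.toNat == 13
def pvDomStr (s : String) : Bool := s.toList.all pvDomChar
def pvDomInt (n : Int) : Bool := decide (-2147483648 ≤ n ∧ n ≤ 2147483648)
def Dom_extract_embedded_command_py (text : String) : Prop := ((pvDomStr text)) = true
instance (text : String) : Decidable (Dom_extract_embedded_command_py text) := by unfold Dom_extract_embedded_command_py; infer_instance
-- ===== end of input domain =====

-- B replaces A's loop over four "verb " prefixes by a single str.find of the first space and a
-- set-membership test on the lowercased leading token (objective: simpler, same cost).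

-- ===== PORT A =====
-- the 'for prefix in prefixes' loop of A, step for step
def pvPrefixLoop (stripped lowered : String) : List String → Option String
  | [] => none
  | p :: rest =>
      if PySem.Str.startswith lowered p = true then
        let candidate := PySem.Str.strip (PySem.Str.slice stripped (some (PySem.Str.len p)) none)
        if PySem.Str.startswith candidate "/" = true then some candidate
        else pvPrefixLoop stripped lowered rest
      else pvPrefixLoop stripped lowered rest

def extract_embedded_command_py (text : String) : Option String :=
  let stripped := PySem.Str.strip text
  let lowered := PySem.Str.lower stripped
  if PySem.Str.startswith stripped "/" = true then some stripped
  else pvPrefixLoop stripped lowered ["run ", "use ", "do ", "execute "]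

-- ===== PORT B =====
def extract_embedded_command_py_alt (text : String) : Option String :=
  let stripped := PySem.Str.strip text
  if PySem.Str.startswith stripped "/" = true then some stripped
  else
    let i := PySem.Str.find stripped " "
    if i ≠ -1 ∧
        PySem.Str.lower (PySem.Str.slice stripped none (some i)) ∈
          (["run", "use", "do", "execute"] : List String) then
      let candidate := PySem.Str.strip (PySem.Str.slice stripped (some (i + 1)) none)
      if PySem.Str.startswith candidate "/" = true then some candidate else none
    else none

-- ===== PRECONDITION & SPEC =====
def Spec_extract_embedded_command_py (text : String) (out : Option String) : Prop := out = extract_embedded_command_py_alt text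
instance (text : String) (out : Option String) : Decidable (Spec_extract_embedded_command_py text out) := by unfold Spec_extract_embedded_command_py; infer_instance

-- ===== CLAIM (what is proved, stated in full; the proofs are below) =====
def Claim_equal_extract_embedded_command_py : Prop := ∀ (text : String), Dom_extract_embedded_command_py text → Spec_extract_embedded_command_py text (extract_embedded_command_py text)

-- ===== LEMMAS AND PROOFS =====

lemma pvLowerChar_space (c : Char) : PySem.Chars.lowerChar c = ' ' ↔ c = ' ' := by
  constructor
  · intro h
    unfold PySem.Chars.lowerChar at h
    split at h
    · exfalso
      rename_i hu
      unfold PySem.Chars.isupper at hu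
      simp only [Bool.and_eq_true, decide_eq_true_eq] at hu
      obtain ⟨hA, hZ⟩ := hu
      rw [Char.le_def, UInt32.le_iff_toNat_le] at hA hZ
      have h65 : ('A' : Char).val.toNat = 65 := by decide
      have h90 : ('Z' : Char).val.toNat = 90 := by decide
      have hc : c.toNat = c.val.toNat := rfl
      have hA' : 65 ≤ c.toNat := by omega
      have hZ' : c.toNat ≤ 90 := by omega
      have hval : (c.toNat + 32).isValidChar := Or.inl (by omega)
      have h2 := congrArg Char.toNat h
      rw [Char.toNat_ofNat, if_pos hval] at h2
      have : (' ' : Char).toNat = 32 := by decide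
      omega
    · exact h
  · intro h; subst h; decide

-- a space occurring at position n makes [' '] an infix
lemma pvSpaceInfix (L : List Char) (n : Nat) (t : List Char)
    (ht : ' ' :: t = List.drop n L) : [' '] <:+: L := by
  refine ⟨List.take n L, t, ?_⟩
  have : List.take n L ++ (' ' :: t) = L := by rw [ht]; exact List.take_append_drop n L
  simpa using this

-- first-space characterisation of A's per-prefix test, on char lists
lemma pvMatch_iff (L v : List Char) (hv : 0 < v.length) (hsp : ' ' ∉ v) :
    PySem.Chars.startswith (PySem.Chars.lower L) (v ++ [' ']) = true ↔
      (PySem.Chars.find L [' '] = (v.length : Int) ∧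
       PySem.Chars.lower (List.take v.length L) = v) := by
  rw [PySem.Chars.startswith_iff]
  simp only [PySem.Chars.lower]
  constructor
  · intro h
    have hlen : v.length + 1 ≤ L.length := by
      have := h.length_le; simpa using this
    have hnlt : v.length < L.length := by omega
    have htake := List.prefix_iff_eq_take.mp h
    rw [← List.map_take] at htake
    simp only [List.length_append, List.length_cons, List.length_nil] at htake
    rw [List.take_add_one, List.getElem?_eq_getElem hnlt] at htake
    simp only [Option.toList_some, List.map_append, List.map_cons, List.map_nil] at htake
    have hlenmap : v.length = (List.map PySem.Chars.lowerChar (List.take v.length L)).length := by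
      simp [Nat.min_eq_left hnlt.le]
    obtain ⟨h1, h2⟩ := List.append_inj htake hlenmap
    have hLn : L[v.length] = ' ' := by
      have : PySem.Chars.lowerChar L[v.length] = ' ' := by
        simpa using h2.symm
      exact (pvLowerChar_space _).mp this
    have hspace_n : [' '] <+: List.drop v.length L := by
      rw [List.drop_eq_getElem_cons hnlt, hLn]
      exact ⟨_, rfl⟩
    have hinf : [' '] <:+: L := by
      obtain ⟨t, htp⟩ := hspace_n
      exact pvSpaceInfix L v.length t (by simpa using htp)
    have h0 : 0 ≤ PySem.Chars.find L [' '] := (PySem.Chars.find_nonneg_iff L [' ']).mpr hinf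
    obtain ⟨hpre, hmin⟩ := PySem.Chars.find_spec h0
    set k := (PySem.Chars.find L [' ']).toNat with hkdef
    have hk_le : k ≤ v.length := by
      by_contra hgt
      exact hmin v.length (by omega) hspace_n
    have hk_ge : v.length ≤ k := by
      by_contra hlt
      obtain ⟨t, htp⟩ := hpre
      have htp' : ' ' :: t = List.drop k L := by simpa using htp
      have hkL : k < L.length := by
        have := congrArg List.length htp'
        simp [List.length_drop] at this
        omega
      have hLk : L[k] = ' ' := by
        have := List.drop_eq_getElem_cons hkL (l := L)
        rw [← htp'] at this
        exact (List.cons.injEq _ _ _ _ ▸ this).1.symm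
      have hkmem : L[k] ∈ List.take v.length L := by
        have hklt : k < (List.take v.length L).length := by
          simp [List.length_take]
          omega
        have hgt : (List.take v.length L)[k]'hklt = L[k] := List.getElem_take
        exact hgt ▸ List.getElem_mem hklt
      have hspv : ' ' ∈ v := by
        rw [h1]
        exact List.mem_map.mpr ⟨L[k], hkmem, by rw [hLk]; decide⟩
      exact hsp hspv
    have hk : k = v.length := le_antisymm hk_le hk_ge
    constructor
    · have := Int.toNat_of_nonneg h0
      rw [← this]
      exact_mod_cast hk
    · exact h1.symm
  · rintro ⟨hf, hl⟩
    have h0 : 0 ≤ PySem.Chars.find L [' '] := by rw [hf]; positivity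
    obtain ⟨hpre, -⟩ := PySem.Chars.find_spec h0
    have hkn : (PySem.Chars.find L [' ']).toNat = v.length := by rw [hf]; simp
    rw [hkn] at hpre
    obtain ⟨t, htp⟩ := hpre
    have htp' : ' ' :: t = List.drop v.length L := by simpa using htp
    have hnlt : v.length < L.length := by
      have := congrArg List.length htp'
      simp [List.length_drop] at this
      omega
    have hLn : L[v.length] = ' ' := by
      have := List.drop_eq_getElem_cons hnlt (l := L)
      rw [← htp'] at this
      exact (List.cons.injEq _ _ _ _ ▸ this).1.symm
    have : v ++ [' '] = List.take (v.length + 1) (List.map PySem.Chars.lowerChar L) := by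
      rw [← List.map_take, List.take_add_one, List.getElem?_eq_getElem hnlt]
      simp only [Option.toList_some, List.map_append, List.map_cons, List.map_nil]
      rw [hl, hLn]
      norm_num [show PySem.Chars.lowerChar ' ' = ' ' from by decide]
    rw [List.prefix_iff_eq_take]
    simpa using this
    
-- string-level wrapper: A's test 'lowered.startswith(verb + " ")' ↔ first space at |verb| and lowered head token = verb
lemma pvSW (s p v : String) (n : Nat)
    (hp : p.toList = v.toList ++ [' ']) (hn : v.toList.length = n)
    (hv0 : 0 < n) (hsp : ' ' ∉ v.toList) :
    (PySem.Str.startswith (PySem.Str.lower s) p = true) ↔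
      (PySem.Str.find s " " = (n : Int) ∧
       PySem.Str.lower (PySem.Str.slice s none (some (n : Int))) = v) := by
  have hm := pvMatch_iff s.toList v.toList (by omega) hsp
  rw [hn] at hm
  constructor
  · intro h
    have h' : PySem.Chars.startswith (PySem.Chars.lower s.toList) (v.toList ++ [' ']) = true := by
      simpa [PySem.Str.startswith, hp] using h
    obtain ⟨h1, h2⟩ := hm.mp h'
    refine ⟨by simpa [PySem.Str.find] using h1, ?_⟩
    rw [← String.toList_inj]
    simp [PySem.Str.lower, PySem.Str.slice, PySem.Chars.slice, PySem.List.slice_to _ (by positivity : (0:Int) ≤ (n:Int)), PySem.Chars.lower] at h2 ⊢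
    simpa using h2
  · rintro ⟨h1, h2⟩
    rw [← String.toList_inj] at h2
    have h2' : PySem.Chars.lower (List.take n s.toList) = v.toList := by
      simpa [PySem.Str.lower, PySem.Str.slice, PySem.Chars.slice,
        PySem.List.slice_to _ (by positivity : (0:Int) ≤ (n:Int)), PySem.Chars.lower] using h2
    have := hm.mpr ⟨by simpa [PySem.Str.find] using h1, h2'⟩
    simpa [PySem.Str.startswith, hp] using this

-- when the verb token test of B succeeds, the first space sits exactly at |v|
lemma pvFindLen (s v : String) (n : Nat) (hn : v.toList.length = n)
    (hk : PySem.Str.find s " " ≠ -1)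
    (hl : PySem.Str.lower (PySem.Str.slice s none (some (PySem.Str.find s " "))) = v) :
    PySem.Str.find s " " = (n : Int) := by
  have hws : (" " : String).toList = [' '] := rfl
  simp only [PySem.Str.find, hws] at hk hl ⊢
  have hge := PySem.Chars.neg_one_le_find s.toList [' ']
  have h0 : 0 ≤ PySem.Chars.find s.toList [' '] := by omega
  obtain ⟨hpre, -⟩ := PySem.Chars.find_spec h0
  have hTL : s.toList.length = s.length := by simp
  have hkL : (PySem.Chars.find s.toList [' ']).toNat < s.toList.length := by
    obtain ⟨t, htp⟩ := hpre
    have hlh := congrArg List.length htp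
    simp [List.length_drop] at hlh
    omega
  rw [← String.toList_inj] at hl
  have hl' : PySem.Chars.lower
      (List.take (PySem.Chars.find s.toList [' ']).toNat s.toList) = v.toList := by
    simpa [PySem.Str.lower, PySem.Str.slice, PySem.Chars.slice,
      PySem.List.slice_to _ h0] using hl
  have hlen := congrArg List.length hl'
  simp only [PySem.Chars.lower, List.length_map, List.length_take] at hlen
  omega

-- the four instantiations
lemma pvSW_run (s : String) :
    (PySem.Str.startswith (PySem.Str.lower s) "run " = true) ↔
      (PySem.Str.find s " " = (3 : Int) ∧
       PySem.Str.lower (PySem.Str.slice s none (some (3 : Int))) = "run") :=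
  pvSW s "run " "run" 3 (by decide) (by decide) (by decide) (by decide)

lemma pvSW_use (s : String) :
    (PySem.Str.startswith (PySem.Str.lower s) "use " = true) ↔
      (PySem.Str.find s " " = (3 : Int) ∧
       PySem.Str.lower (PySem.Str.slice s none (some (3 : Int))) = "use") :=
  pvSW s "use " "use" 3 (by decide) (by decide) (by decide) (by decide)

lemma pvSW_do (s : String) :
    (PySem.Str.startswith (PySem.Str.lower s) "do " = true) ↔
      (PySem.Str.find s " " = (2 : Int) ∧
       PySem.Str.lower (PySem.Str.slice s none (some (2 : Int))) = "do") :=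
  pvSW s "do " "do" 2 (by decide) (by decide) (by decide) (by decide)

lemma pvSW_execute (s : String) :
    (PySem.Str.startswith (PySem.Str.lower s) "execute " = true) ↔
      (PySem.Str.find s " " = (7 : Int) ∧
       PySem.Str.lower (PySem.Str.slice s none (some (7 : Int))) = "execute") :=
  pvSW s "execute " "execute" 7 (by decide) (by decide) (by decide) (by decide)

lemma pvCore (s : String) :
    pvPrefixLoop s (PySem.Str.lower s) ["run ", "use ", "do ", "execute "] =
      (if PySem.Str.find s " " ≠ -1 ∧
          PySem.Str.lower (PySem.Str.slice s none (some (PySem.Str.find s " "))) ∈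
            (["run", "use", "do", "execute"] : List String) then
        (if PySem.Str.startswith
            (PySem.Str.strip (PySem.Str.slice s (some (PySem.Str.find s " " + 1)) none)) "/" = true then
          some (PySem.Str.strip (PySem.Str.slice s (some (PySem.Str.find s " " + 1)) none))
        else none)
      else none) := by
  by_cases h1 : PySem.Str.startswith (PySem.Str.lower s) "run " = true
  · obtain ⟨hf, hl⟩ := (pvSW_run s).mp h1
    have h2 : ¬ PySem.Str.startswith (PySem.Str.lower s) "use " = true := by
      intro h
      obtain ⟨-, hl2⟩ := (pvSW_use s).mp h
      rw [hl] at hl2; exact absurd hl2 (by decide)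
    have h3 : ¬ PySem.Str.startswith (PySem.Str.lower s) "do " = true := by
      intro h
      obtain ⟨hf2, -⟩ := (pvSW_do s).mp h
      rw [hf] at hf2; exact absurd hf2 (by decide)
    have h4 : ¬ PySem.Str.startswith (PySem.Str.lower s) "execute " = true := by
      intro h
      obtain ⟨hf2, -⟩ := (pvSW_execute s).mp h
      rw [hf] at hf2; exact absurd hf2 (by decide)
    have hlen : PySem.Str.len "run " = (4 : Int) := by decide
    simp only [pvPrefixLoop, h1, h2, h3, h4, if_true, hf, hl, hlen]
    norm_num
  · by_cases h2 : PySem.Str.startswith (PySem.Str.lower s) "use " = true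
    · obtain ⟨hf, hl⟩ := (pvSW_use s).mp h2
      have h3 : ¬ PySem.Str.startswith (PySem.Str.lower s) "do " = true := by
        intro h
        obtain ⟨hf2, -⟩ := (pvSW_do s).mp h
        rw [hf] at hf2; exact absurd hf2 (by decide)
      have h4 : ¬ PySem.Str.startswith (PySem.Str.lower s) "execute " = true := by
        intro h
        obtain ⟨hf2, -⟩ := (pvSW_execute s).mp h
        rw [hf] at hf2; exact absurd hf2 (by decide)
      have hlen : PySem.Str.len "use " = (4 : Int) := by decide
      simp only [pvPrefixLoop, h1, h2, h3, h4, if_true, hf, hl, hlen]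
      norm_num
    · by_cases h3 : PySem.Str.startswith (PySem.Str.lower s) "do " = true
      · obtain ⟨hf, hl⟩ := (pvSW_do s).mp h3
        have h4 : ¬ PySem.Str.startswith (PySem.Str.lower s) "execute " = true := by
          intro h
          obtain ⟨hf2, -⟩ := (pvSW_execute s).mp h
          rw [hf] at hf2; exact absurd hf2 (by decide)
        have hlen : PySem.Str.len "do " = (3 : Int) := by decide
        simp only [pvPrefixLoop, h1, h2, h3, h4, if_true, hf, hl, hlen]
        norm_num
      · by_cases h4 : PySem.Str.startswith (PySem.Str.lower s) "execute " = true
        · obtain ⟨hf, hl⟩ := (pvSW_execute s).mp h4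
          have hlen : PySem.Str.len "execute " = (8 : Int) := by decide
          simp only [pvPrefixLoop, h1, h2, h3, h4, if_true, hf, hl, hlen]
          norm_num
        · -- no prefix matches: A's loop returns none; show B's condition is false
          have hb : ¬ (PySem.Str.find s " " ≠ -1 ∧
              PySem.Str.lower (PySem.Str.slice s none (some (PySem.Str.find s " "))) ∈
                (["run", "use", "do", "execute"] : List String)) := by
            rintro ⟨hk, hmem⟩
            simp only [List.mem_cons, List.not_mem_nil, or_false] at hmem
            rcases hmem with hv | hv | hv | hv
            · have hf := pvFindLen s "run" 3 (by decide) hk hv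
              rw [hf] at hv
              exact h1 ((pvSW_run s).mpr ⟨by simpa using hf, by simpa using hv⟩)
            · have hf := pvFindLen s "use" 3 (by decide) hk hv
              rw [hf] at hv
              exact h2 ((pvSW_use s).mpr ⟨by simpa using hf, by simpa using hv⟩)
            · have hf := pvFindLen s "do" 2 (by decide) hk hv
              rw [hf] at hv
              exact h3 ((pvSW_do s).mpr ⟨by simpa using hf, by simpa using hv⟩)
            · have hf := pvFindLen s "execute" 7 (by decide) hk hv
              rw [hf] at hv
              exact h4 ((pvSW_execute s).mpr ⟨by simpa using hf, by simpa using hv⟩)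
          simp only [pvPrefixLoop, h1, h2, h3, h4, if_false, hb]
          simp

-- ===== VERDICT (by name: the statement is the Claim_ definition above) =====
theorem extract_embedded_command_py_spec : Claim_equal_extract_embedded_command_py := by
  intro text _
  show extract_embedded_command_py text = extract_embedded_command_py_alt text
  show (if PySem.Str.startswith (PySem.Str.strip text) "/" = true
        then some (PySem.Str.strip text)
        else pvPrefixLoop (PySem.Str.strip text) (PySem.Str.lower (PySem.Str.strip text))
          ["run ", "use ", "do ", "execute "]) =
      (if PySem.Str.startswith (PySem.Str.strip text) "/" = true
        then some (PySem.Str.strip text)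
        else
          if PySem.Str.find (PySem.Str.strip text) " " ≠ -1 ∧
              PySem.Str.lower (PySem.Str.slice (PySem.Str.strip text) none
                  (some (PySem.Str.find (PySem.Str.strip text) " "))) ∈
                (["run", "use", "do", "execute"] : List String) then
            (if PySem.Str.startswith
                (PySem.Str.strip (PySem.Str.slice (PySem.Str.strip text)
                  (some (PySem.Str.find (PySem.Str.strip text) " " + 1)) none)) "/" = true then
              some (PySem.Str.strip (PySem.Str.slice (PySem.Str.strip text)
                (some (PySem.Str.find (PySem.Str.strip text) " " + 1)) none))
            else none)
          else none)
  by_cases h0 : PySem.Str.startswith (PySem.Str.strip text) "/" = true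
  · rw [if_pos h0, if_pos h0]
  · rw [if_neg h0, if_neg h0]
    exact pvCore (PySem.Str.strip text)
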